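-- pv_equiv track=rewrite | github.com/DanJamRod/assignment-1-DanJamRod | q5.py | awesome_word
-- ===== SOURCE A (Python) =====
-- def awesome_word(word):
--     """ Finds if word is an awesome word (at least one identical non-overlapping word couplet and one xyx type substring)
--     """
--     flag = False # Sets flag initially to False
--     for i in range (len(word)-2): # Runs the program for every letter except the last two (last two letters have no pairs to compare it to after)
--         for j in range (len(word)-3-i): # Runs the program for every letter after letter[i]&[i+1], except the last two (last two letters have no pairs to compare it to after)
--             if word[i:i+2] == word[j+i+2:j+i+4]: # Checks whether a specific letter pair is equal to a specific later pair
--                 flag = True # If there is an identical non-overlapping word couplet, flag changes to True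
--     if flag == False: # If the flag is not True, there is no identical non-overlapping word couplet, word is not awesome and returns False. If flag is True, word continues to the next check
--         return False
--
--     flag = False # Resets flag to False
--     for i in range(len(word)-2): # Runs the program for every letter except the last two (last two letters have no letters to compare it to after)
--         if word[i] == word [i+2]: # Checks whether the letter is the same as the second letter after (i.e. whether xyx, y can be any value(including x))
--             flag = True # If there is an identical xyx type substring, flag changes to True
--     return flag # If flag is False, no identical xyx type substring, word returns False. If identical xyx type substring, word is awesome so returns True
-- ===== SOURCE B (Python) =====
-- def awesome_word(word):
--     """ Finds if word is an awesome word (at least one identical non-overlapping word couplet and one xyx type substring)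
--     """
--     n = len(word)
--     first = {}          # 2-gram -> earliest starting position
--     pair_flag = False
--     xyx_flag = False
--     for k in range(n - 1):
--         g = word[k:k+2]
--         if g in first:
--             if k - first[g] >= 2:
--                 pair_flag = True
--         else:
--             first[g] = k
--         if k + 2 < n and word[k] == word[k+2]:
--             xyx_flag = True
--     return pair_flag and xyx_flag
-- ===== Notes on version B (the rewrite author's own statement) =====
-- stated objective: faster
-- what changed: Replaced the quadratic all-pairs 2-gram comparison by a single pass that keeps the earliest position of each 2-gram in a dict and flags when the same 2-gram recurs at distance >= 2, folding the xyx scan into the same pass.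
import Mathlib
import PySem

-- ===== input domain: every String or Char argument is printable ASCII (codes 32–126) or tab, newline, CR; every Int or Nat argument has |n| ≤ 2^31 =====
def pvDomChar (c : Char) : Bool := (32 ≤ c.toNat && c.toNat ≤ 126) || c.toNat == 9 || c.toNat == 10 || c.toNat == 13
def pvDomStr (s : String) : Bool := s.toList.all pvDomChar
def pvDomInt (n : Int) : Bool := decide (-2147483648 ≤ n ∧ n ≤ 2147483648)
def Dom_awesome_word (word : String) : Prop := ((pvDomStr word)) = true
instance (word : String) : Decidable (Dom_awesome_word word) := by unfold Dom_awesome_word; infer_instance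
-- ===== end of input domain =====

-- B replaces A's quadratic all-pairs 2-gram scan by one pass keeping each 2-gram's earliest position in a dict (faster).

-- ===== PORT A =====
def awesome_word (word : String) : Bool :=
  let n := PySem.Str.len word
  let flag :=
    (PySem.List.pyRange 0 (n - 2) 1).foldl (fun flag i =>
      (PySem.List.pyRange 0 (n - 3 - i) 1).foldl (fun flag j =>
        if PySem.Str.slice word (some i) (some (i + 2)) =
            PySem.Str.slice word (some (j + i + 2)) (some (j + i + 4)) then true
        else flag) flag) false
  if flag = false then false
  else
    (PySem.List.pyRange 0 (n - 2) 1).foldl (fun flag i =>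
      if PySem.Str.pyGet? word i = PySem.Str.pyGet? word (i + 2) then true else flag) false

-- ===== PORT B =====
def awesome_word_alt (word : String) : Bool :=
  let n := PySem.Str.len word
  let st := (PySem.List.pyRange 0 (n - 1) 1).foldl
    (fun (st : PySem.Dict String Int × Bool × Bool) k =>
      let g := PySem.Str.slice word (some k) (some (k + 2))
      let fp : PySem.Dict String Int × Bool :=
        match st.1.get? g with
        | some p => (st.1, if k - p ≥ 2 then true else st.2.1)
        | none => (st.1.insert g k, st.2.1)
      let xf := if k + 2 < n ∧ PySem.Str.pyGet? word k = PySem.Str.pyGet? word (k + 2)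
                then true else st.2.2
      (fp.1, fp.2, xf))
    (PySem.Dict.empty, false, false)
  st.2.1 && st.2.2

-- ===== PRECONDITION & SPEC =====
def Spec_awesome_word (word : String) (out : Bool) : Prop := out = awesome_word_alt word
instance (word : String) (out : Bool) : Decidable (Spec_awesome_word word out) := by unfold Spec_awesome_word; infer_instance

-- ===== CLAIM (what is proved, stated in full; the proofs are below) =====
def Claim_equal_awesome_word : Prop := ∀ (word : String), Dom_awesome_word word → Spec_awesome_word word (awesome_word word)

-- ===== LEMMAS AND PROOFS =====

-- the 2-gram starting at k, as both ports compute it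
def pvGram (w : String) (k : Int) : String := PySem.Str.slice w (some k) (some (k + 2))

-- "some 2-gram repeats non-overlappingly, both copies fitting in the word"
def PvPair (w : String) : Prop :=
  ∃ p q : Int, 0 ≤ p ∧ p + 2 ≤ q ∧ q ≤ PySem.Str.len w - 2 ∧ pvGram w p = pvGram w q

-- "some xyx substring"
def PvXyx (w : String) : Prop :=
  ∃ i : Int, 0 ≤ i ∧ i < PySem.Str.len w - 2 ∧ PySem.Str.pyGet? w i = PySem.Str.pyGet? w (i + 2)

lemma foldl_flag {α : Type} (p : α → Prop) [DecidablePred p] (xs : List α) (b : Bool) :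
    xs.foldl (fun acc x => if p x then true else acc) b = (b || xs.any fun x => decide (p x)) := by
  induction xs generalizing b with
  | nil => simp
  | cons x xs ih =>
    simp only [List.foldl_cons, List.any_cons, ih]
    by_cases h : p x <;> simp [h]

lemma foldl_or {α : Type} (f : α → Bool) (xs : List α) (b : Bool) :
    xs.foldl (fun acc x => acc || f x) b = (b || xs.any f) := by
  induction xs generalizing b with
  | nil => simp
  | cons x xs ih => simp [List.foldl_cons, ih, Bool.or_assoc]

lemma str_len_nonneg (w : String) : 0 ≤ PySem.Str.len w := by
  simp [PySem.Str.len_eq]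

lemma A_iff (w : String) : awesome_word w = true ↔ PvPair w ∧ PvXyx w := by
  unfold awesome_word PvPair PvXyx pvGram
  simp only [foldl_flag, foldl_or, Bool.false_or]
  split_ifs with h
  · simp only [false_iff]
    rintro ⟨⟨p, q, h1, h2, h3, h4⟩, -⟩
    rw [List.any_eq_false] at h
    have hq2 : q - p - 2 + p + 2 = q := by ring
    have hq4 : q - p - 2 + p + 4 = q + 2 := by ring
    refine h p (PySem.List.mem_pyRange_one.mpr ⟨h1, by omega⟩) ?_
    refine List.any_eq_true.mpr ⟨q - p - 2, PySem.List.mem_pyRange_one.mpr ⟨by omega, by omega⟩, ?_⟩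
    simp only [decide_eq_true_eq]
    rw [hq2, hq4]
    exact h4
  · rw [Bool.not_eq_false] at h
    constructor
    · intro hx
      constructor
      · rw [List.any_eq_true] at h
        obtain ⟨i, hi, hin⟩ := h
        rw [List.any_eq_true] at hin
        obtain ⟨j, hj, hgr⟩ := hin
        rw [PySem.List.mem_pyRange_one] at hi hj
        rw [decide_eq_true_eq] at hgr
        refine ⟨i, j + i + 2, hi.1, by omega, by omega, ?_⟩
        have e : j + i + 2 + 2 = j + i + 4 := by ring
        rw [e]
        exact hgr
      · rw [List.any_eq_true] at hx
        obtain ⟨i, hi, hc⟩ := hx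
        rw [PySem.List.mem_pyRange_one] at hi
        rw [decide_eq_true_eq] at hc
        exact ⟨i, hi.1, hi.2, hc⟩
    · rintro ⟨-, i, h1, h2, h3⟩
      refine List.any_eq_true.mpr ⟨i, PySem.List.mem_pyRange_one.mpr ⟨h1, h2⟩, ?_⟩
      simp only [decide_eq_true_eq]
      exact h3

-- proof-side name for B's loop step (definitionally the lambda in awesome_word_alt)
def pvStep (w : String) : (PySem.Dict String Int × Bool × Bool) → Int → (PySem.Dict String Int × Bool × Bool) :=
  fun st k =>
    let g := PySem.Str.slice w (some k) (some (k + 2))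
    let fp : PySem.Dict String Int × Bool :=
      match st.1.get? g with
      | some p => (st.1, if k - p ≥ 2 then true else st.2.1)
      | none => (st.1.insert g k, st.2.1)
    let xf := if k + 2 < PySem.Str.len w ∧ PySem.Str.pyGet? w k = PySem.Str.pyGet? w (k + 2)
              then true else st.2.2
    (fp.1, fp.2, xf)

def pvLoop (w : String) (m : Nat) : PySem.Dict String Int × Bool × Bool :=
  (PySem.List.pyRange 0 (m : Int) 1).foldl (pvStep w) (PySem.Dict.empty, false, false)

lemma pyRange_zero_toNat (b : Int) :
    PySem.List.pyRange 0 b 1 = PySem.List.pyRange 0 ((b.toNat : Int)) 1 := by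
  by_cases h : b ≤ 0
  · rw [PySem.List.pyRange_one_eq_nil h, PySem.List.pyRange_one_eq_nil (by omega)]
  · congr 1
    omega

lemma find?_singleton (p : Int → Bool) (a : Int) :
    [a].find? p = if p a then some a else none := by
  cases h : p a <;> simp [List.find?, h]

lemma find?_pyRange_none {pred : Int → Bool} {m : Nat}
    (h : (PySem.List.pyRange 0 (m : Int) 1).find? pred = none) :
    ∀ p : Int, 0 ≤ p → p < (m : Int) → pred p = false := by
  intro p hp0 hpm
  have := List.find?_eq_none.mp h p (PySem.List.mem_pyRange_one.mpr ⟨hp0, hpm⟩)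
  simpa using this

lemma find?_pyRange_some {pred : Int → Bool} {m : Nat} {p0 : Int}
    (h : (PySem.List.pyRange 0 (m : Int) 1).find? pred = some p0) :
    0 ≤ p0 ∧ p0 < (m : Int) ∧ pred p0 = true ∧
      ∀ p : Int, 0 ≤ p → p < p0 → pred p = false := by
  induction m with
  | zero =>
    rw [PySem.List.pyRange_one_eq_nil (by omega)] at h
    simp at h
  | succ m ih =>
    have hm : (((m + 1 : Nat)) : Int) = (m : Int) + 1 := by omega
    rw [hm, PySem.List.pyRange_one_succ_right (by omega), List.find?_append] at h
    cases hfst : (PySem.List.pyRange 0 (m : Int) 1).find? pred with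
    | some q =>
      rw [hfst] at h
      simp only [Option.some_or] at h
      obtain rfl : q = p0 := by simpa using h
      obtain ⟨h1, h2, h3, h4⟩ := ih hfst
      exact ⟨h1, by omega, h3, h4⟩
    | none =>
      rw [hfst] at h
      simp only [Option.none_or, find?_singleton] at h
      split_ifs at h with hpm
      · obtain rfl : (m : Int) = p0 := by simpa using h
        exact ⟨by omega, by omega, hpm, fun p hp0 hpp => find?_pyRange_none hfst p hp0 hpp⟩

lemma B_loop (w : String) (m : Nat) :
    (∀ g, (pvLoop w m).1.get? g = ((PySem.List.pyRange 0 (m : Int) 1).find? (fun p => pvGram w p == g)))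
    ∧ ((pvLoop w m).2.1 = true ↔
        (∃ p q : Int, 0 ≤ p ∧ p + 2 ≤ q ∧ q < (m : Int) ∧ pvGram w p = pvGram w q))
    ∧ ((pvLoop w m).2.2 = true ↔
        (∃ i : Int, 0 ≤ i ∧ i < (m : Int) ∧ i + 2 < PySem.Str.len w ∧
          PySem.Str.pyGet? w i = PySem.Str.pyGet? w (i + 2))) := by
  induction m with
  | zero =>
    unfold pvLoop
    rw [PySem.List.pyRange_one_eq_nil (by omega)]
    refine ⟨fun g => by simp [PySem.Dict.get?_empty], ?_, ?_⟩
    · simp only [List.foldl_nil, Bool.false_eq_true, false_iff]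
      rintro ⟨p, q, h1, h2, h3, -⟩
      omega
    · simp only [List.foldl_nil, Bool.false_eq_true, false_iff]
      rintro ⟨i, h1, h2, -⟩
      omega
  | succ m ih =>
    obtain ⟨ih1, ih2, ih3⟩ := ih
    have hm : (((m + 1 : Nat)) : Int) = (m : Int) + 1 := by omega
    have hrange : PySem.List.pyRange 0 (((m + 1 : Nat)) : Int) 1 =
        PySem.List.pyRange 0 (m : Int) 1 ++ [(m : Int)] := by
      rw [hm]
      exact PySem.List.pyRange_one_succ_right (by omega)
    have hloop : pvLoop w (m + 1) = pvStep w (pvLoop w m) (m : Int) := by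
      unfold pvLoop
      rw [hrange, List.foldl_append]
      simp
    have hgm : PySem.Str.slice w (some (m : Int)) (some ((m : Int) + 2)) = pvGram w (m : Int) := rfl
    cases hget : (pvLoop w m).1.get? (pvGram w (m : Int)) with
    | some p0 =>
      have hfind := ih1 (pvGram w (m : Int))
      rw [hget] at hfind
      obtain ⟨hp00, hp0m, hp0g, hp0min⟩ := find?_pyRange_some hfind.symm
      have hp0g' : pvGram w p0 = pvGram w (m : Int) := by simpa using hp0g
      have hstep : pvLoop w (m + 1) =
          ((pvLoop w m).1,
           (if (m : Int) - p0 ≥ 2 then true else (pvLoop w m).2.1),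
           (if (m : Int) + 2 < PySem.Str.len w ∧
              PySem.Str.pyGet? w (m : Int) = PySem.Str.pyGet? w ((m : Int) + 2)
            then true else (pvLoop w m).2.2)) := by
        rw [hloop]
        simp only [pvStep, hgm, hget]
      refine ⟨?_, ?_, ?_⟩
      · intro g'
        rw [hstep]
        simp only
        rw [ih1 g', hrange, List.find?_append]
        cases hq : (PySem.List.pyRange 0 (m : Int) 1).find? (fun p => pvGram w p == g') with
        | some q => simp
        | none =>
          simp only [Option.none_or, find?_singleton]
          split_ifs with hgg
          · exfalso
            have hge : g' = pvGram w (m : Int) := (by simpa using hgg : pvGram w (m : Int) = g').symm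
            rw [hge] at hq
            rw [hq] at hfind
            simp at hfind
          · rfl
      · rw [hstep]
        simp only [hm]
        split_ifs with hd
        · simp only [true_iff]
          exact ⟨p0, (m : Int), hp00, by omega, by omega, hp0g'⟩
        · rw [ih2]
          constructor
          · rintro ⟨p, q, h1, h2, h3, h4⟩
            exact ⟨p, q, h1, h2, by omega, h4⟩
          · rintro ⟨p, q, h1, h2, h3, h4⟩
            rcases (by omega : q < (m : Int) ∨ q = (m : Int)) with hq | rfl
            · exact ⟨p, q, h1, h2, hq, h4⟩
            · exfalso
              have hple : p0 ≤ p := by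
                by_contra hcon
                have hfalse := hp0min p h1 (by omega)
                rw [h4] at hfalse
                simp at hfalse
              omega
      · rw [hstep]
        simp only [hm]
        split_ifs with hd
        · simp only [true_iff]
          exact ⟨(m : Int), by omega, by omega, hd.1, hd.2⟩
        · rw [ih3]
          constructor
          · rintro ⟨i, h1, h2, h3, h4⟩
            exact ⟨i, h1, by omega, h3, h4⟩
          · rintro ⟨i, h1, h2, h3, h4⟩
            rcases (by omega : i < (m : Int) ∨ i = (m : Int)) with hi | rfl
            · exact ⟨i, h1, hi, h3, h4⟩
            · exact absurd ⟨h3, h4⟩ hd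
    | none =>
      have hfind := ih1 (pvGram w (m : Int))
      rw [hget] at hfind
      have hnone : ∀ p : Int, 0 ≤ p → p < (m : Int) →
          (pvGram w p == pvGram w (m : Int)) = false :=
        find?_pyRange_none hfind.symm
      have hstep : pvLoop w (m + 1) =
          ((pvLoop w m).1.insert (pvGram w (m : Int)) (m : Int),
           (pvLoop w m).2.1,
           (if (m : Int) + 2 < PySem.Str.len w ∧
              PySem.Str.pyGet? w (m : Int) = PySem.Str.pyGet? w ((m : Int) + 2)
            then true else (pvLoop w m).2.2)) := by
        rw [hloop]
        simp only [pvStep, hgm, hget]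
      refine ⟨?_, ?_, ?_⟩
      · intro g'
        rw [hstep]
        simp only
        rw [hrange, List.find?_append]
        by_cases hgg : g' = pvGram w (m : Int)
        · subst hgg
          rw [PySem.Dict.get?_insert_self, ← hfind]
          simp
        · rw [PySem.Dict.get?_insert_of_ne _ _ hgg, ih1 g']
          cases hq : (PySem.List.pyRange 0 (m : Int) 1).find? (fun p => pvGram w p == g') with
          | some q => simp
          | none =>
            simp only [Option.none_or, find?_singleton]
            split_ifs with hg2
            · exact absurd ((by simpa using hg2 : pvGram w (m : Int) = g')).symm hgg
            · rfl
      · rw [hstep]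
        simp only [hm]
        rw [ih2]
        constructor
        · rintro ⟨p, q, h1, h2, h3, h4⟩
          exact ⟨p, q, h1, h2, by omega, h4⟩
        · rintro ⟨p, q, h1, h2, h3, h4⟩
          rcases (by omega : q < (m : Int) ∨ q = (m : Int)) with hq | rfl
          · exact ⟨p, q, h1, h2, hq, h4⟩
          · exfalso
            have hfalse := hnone p h1 (by omega)
            rw [h4] at hfalse
            simp at hfalse
      · rw [hstep]
        simp only [hm]
        split_ifs with hd
        · simp only [true_iff]
          exact ⟨(m : Int), by omega, by omega, hd.1, hd.2⟩
        · rw [ih3]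
          constructor
          · rintro ⟨i, h1, h2, h3, h4⟩
            exact ⟨i, h1, by omega, h3, h4⟩
          · rintro ⟨i, h1, h2, h3, h4⟩
            rcases (by omega : i < (m : Int) ∨ i = (m : Int)) with hi | rfl
            · exact ⟨i, h1, hi, h3, h4⟩
            · exact absurd ⟨h3, h4⟩ hd

lemma B_iff (w : String) : awesome_word_alt w = true ↔ PvPair w ∧ PvXyx w := by
  have hn := str_len_nonneg w
  have hB0 : awesome_word_alt w =
      (((PySem.List.pyRange 0 (PySem.Str.len w - 1) 1).foldl (pvStep w)
          (PySem.Dict.empty, false, false)).2.1 &&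
       ((PySem.List.pyRange 0 (PySem.Str.len w - 1) 1).foldl (pvStep w)
          (PySem.Dict.empty, false, false)).2.2) := rfl
  rw [pyRange_zero_toNat] at hB0
  obtain ⟨-, h1, h2⟩ := B_loop w (PySem.Str.len w - 1).toNat
  unfold pvLoop at h1 h2
  rw [hB0, Bool.and_eq_true, h1, h2]
  unfold PvPair PvXyx
  constructor
  · rintro ⟨⟨p, q, a1, a2, a3, a4⟩, ⟨i, b1, b2, b3, b4⟩⟩
    exact ⟨⟨p, q, a1, a2, by omega, a4⟩, ⟨i, b1, by omega, b4⟩⟩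
  · rintro ⟨⟨p, q, a1, a2, a3, a4⟩, ⟨i, b1, b2, b4⟩⟩
    exact ⟨⟨p, q, a1, a2, by omega, a4⟩, ⟨i, b1, by omega, by omega, b4⟩⟩

-- ===== VERDICT (by name: the statement is the Claim_ definition above) =====
theorem awesome_word_spec : Claim_equal_awesome_word := by
  intro w _
  unfold Spec_awesome_word
  have ha := A_iff w
  have hb := B_iff w
  cases h1 : awesome_word w <;> cases h2 : awesome_word_alt w <;> simp_all
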